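-- pv_equiv track=rewrite | github.com/freestuffdude5-ops/fitbites-backend | src/services/recipe_cost.py | _extract_unit
-- ===== SOURCE A (Python) =====
-- from typing import Optional
--
-- _UNIT_TO_CUPS = {
--     "cup": 1.0, "cups": 1.0,
--     "tbsp": 0.0625, "tablespoon": 0.0625, "tablespoons": 0.0625, "tbsps": 0.0625,
--     "tsp": 0.0208, "teaspoon": 0.0208, "teaspoons": 0.0208, "tsps": 0.0208,
--     "oz": 0.125, "ounce": 0.125, "ounces": 0.125,
--     "lb": 1.0, "lbs": 1.0, "pound": 1.0, "pounds": 1.0,  # special: weight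
--     "g": 0.00423, "gram": 0.00423, "grams": 0.00423,
--     "ml": 0.00423, "kg": 4.23,
--     "scoop": 1.0, "scoops": 1.0,  # treat as ~1 serving
--     "pinch": 0.005, "dash": 0.01,
--     "clove": 1.0, "cloves": 1.0,  # garlic cloves
--     "slice": 1.0, "slices": 1.0,
--     "piece": 1.0, "pieces": 1.0,
--     "can": 1.0, "cans": 1.0,
--     "bunch": 1.0, "head": 1.0, "stalk": 1.0, "stalks": 1.0,
--     "sprig": 1.0, "sprigs": 1.0,
--     "package": 1.0, "serving": 1.0, "servings": 1.0,
-- }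
--
-- def _extract_unit(amount_str: str) -> Optional[str]:
--     """Extract the unit from an amount string."""
--     if not amount_str:
--         return None
--     text = amount_str.lower()
--     for unit in sorted(_UNIT_TO_CUPS.keys(), key=len, reverse=True):
--         if unit in text:
--             return unit
--     return None
-- ===== SOURCE B (Python) =====
-- from typing import Optional
--
-- # Same 43 units as _UNIT_TO_CUPS's keys, pre-grouped once by length (longest
-- # bucket first; within a bucket, dict insertion order).  This is exactly the
-- # stable sort A recomputes on every call, done once as a literal table.
-- _BUCKETS = (
--     ("tablespoons",),
--     ("tablespoon",),
--     ("teaspoons",),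
--     ("teaspoon", "servings"),
--     ("package", "serving"),
--     ("ounces", "pounds", "scoops", "cloves", "slices", "pieces", "stalks", "sprigs"),
--     ("tbsps", "ounce", "pound", "grams", "scoop", "pinch", "clove", "slice",
--      "piece", "bunch", "stalk", "sprig"),
--     ("cups", "tbsp", "tsps", "gram", "dash", "cans", "head"),
--     ("cup", "tsp", "lbs", "can"),
--     ("oz", "lb", "ml", "kg"),
--     ("g",),
-- )
--
--
-- def _extract_unit(amount_str: str) -> Optional[str]:
--     """Extract the unit from an amount string: scan length buckets from the
--     longest down; the first unit of the first bucket with a match wins."""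
--     if not amount_str:
--         return None
--     text = amount_str.lower()
--     for bucket in _BUCKETS:
--         for unit in bucket:
--             if unit in text:
--                 return unit
--     return None
-- ===== Notes on version B (the rewrite author's own statement) =====
-- stated objective: simpler
-- what changed: Replaces the per-call stable sort of the 43 dict keys by length followed by a first-match scan with a precomputed literal table of length buckets (longest first, insertion order inside each bucket) scanned by two nested first-match loops, so no sorting or key-list building happens at call time.
import Mathlib
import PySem

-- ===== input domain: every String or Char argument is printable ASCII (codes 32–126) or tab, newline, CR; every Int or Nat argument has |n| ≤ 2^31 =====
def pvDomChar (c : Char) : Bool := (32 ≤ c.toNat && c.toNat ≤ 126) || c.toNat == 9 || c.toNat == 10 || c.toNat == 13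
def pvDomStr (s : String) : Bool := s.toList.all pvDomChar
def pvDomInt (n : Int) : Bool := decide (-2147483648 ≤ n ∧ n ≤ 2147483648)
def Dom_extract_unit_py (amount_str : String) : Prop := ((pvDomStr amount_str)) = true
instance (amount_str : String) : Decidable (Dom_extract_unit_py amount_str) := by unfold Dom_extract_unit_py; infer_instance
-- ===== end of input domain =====

-- B replaces A's per-call sort-by-length + first-match scan with a precomputed literal
-- table of length buckets scanned by two nested first-match loops (objective: simpler).

-- ===== PORT A =====
-- _UNIT_TO_CUPS has float values the function never reads: only its keys
-- (in insertion order) are used, so only the key list is ported.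
def pvUnitKeys : List String :=
  ["cup", "cups",
   "tbsp", "tablespoon", "tablespoons", "tbsps",
   "tsp", "teaspoon", "teaspoons", "tsps",
   "oz", "ounce", "ounces",
   "lb", "lbs", "pound", "pounds",
   "g", "gram", "grams",
   "ml", "kg",
   "scoop", "scoops",
   "pinch", "dash",
   "clove", "cloves",
   "slice", "slices",
   "piece", "pieces",
   "can", "cans",
   "bunch", "head", "stalk", "stalks",
   "sprig", "sprigs",
   "package", "serving", "servings"]

-- 'for unit in sorted(...): if unit in text: return unit' is first-match: List.find?
def extract_unit_py (amount_str : String) : Option String :=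
  if amount_str = "" then none
  else
    let text := PySem.Str.lower amount_str
    List.find? (fun unit => PySem.Str.isIn unit text)
      (PySem.List.sorted pvUnitKeys (fun u => PySem.Str.len u) true)

-- ===== PORT B =====
-- Source B's module-level literal _BUCKETS: the units grouped by length, longest bucket first
def pvBuckets : List (List String) :=
  [["tablespoons"],
   ["tablespoon"],
   ["teaspoons"],
   ["teaspoon", "servings"],
   ["package", "serving"],
   ["ounces", "pounds", "scoops", "cloves", "slices", "pieces", "stalks", "sprigs"],
   ["tbsps", "ounce", "pound", "grams", "scoop", "pinch", "clove", "slice",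
    "piece", "bunch", "stalk", "sprig"],
   ["cups", "tbsp", "tsps", "gram", "dash", "cans", "head"],
   ["cup", "tsp", "lbs", "can"],
   ["oz", "lb", "ml", "kg"],
   ["g"]]

-- inner loop: 'for unit in bucket: if unit in text: return unit'
def pvInnerLoop (text : String) : List String → Option String
  | [] => none
  | u :: rest => if PySem.Str.isIn u text then some u else pvInnerLoop text rest

-- outer loop: 'for bucket in _BUCKETS: …' with the early return threaded through
def pvOuterLoop (text : String) : List (List String) → Option String
  | [] => none
  | b :: bs =>
      match pvInnerLoop text b with
      | some u => some u
      | none => pvOuterLoop text bs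

def extract_unit_py_alt (amount_str : String) : Option String :=
  if amount_str = "" then none
  else pvOuterLoop (PySem.Str.lower amount_str) pvBuckets

-- ===== PRECONDITION & SPEC =====
def Spec_extract_unit_py (amount_str : String) (out : Option String) : Prop := out = extract_unit_py_alt amount_str
instance (amount_str : String) (out : Option String) : Decidable (Spec_extract_unit_py amount_str out) := by unfold Spec_extract_unit_py; infer_instance

-- ===== CLAIM (what is proved, stated in full; the proofs are below) =====
def Claim_equal_extract_unit_py : Prop := ∀ (amount_str : String), Dom_extract_unit_py amount_str → Spec_extract_unit_py amount_str (extract_unit_py amount_str)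

-- ===== LEMMAS AND PROOFS =====

lemma pvInner_eq_find (text : String) (b : List String) :
    pvInnerLoop text b = List.find? (fun u => PySem.Str.isIn u text) b := by
  induction b with
  | nil => rfl
  | cons u rest ih =>
      simp only [pvInnerLoop, List.find?]
      cases h : PySem.Str.isIn u text <;> simp [ih]

lemma pvOuter_eq_find_flatten (text : String) (bs : List (List String)) :
    pvOuterLoop text bs = List.find? (fun u => PySem.Str.isIn u text) bs.flatten := by
  induction bs with
  | nil => rfl
  | cons b rest ih =>
      simp only [pvOuterLoop, List.flatten_cons, List.find?_append, pvInner_eq_find, ih]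
      cases h : List.find? (fun u => PySem.Str.isIn u text) b <;> simp

-- the flattened bucket table IS A's per-call stable sort (a closed computation)
lemma pvFlatten_eq_sorted :
    pvBuckets.flatten = PySem.List.sorted pvUnitKeys (fun u => PySem.Str.len u) true := by
  decide

-- ===== VERDICT (by name: the statement is the Claim_ definition above) =====
theorem extract_unit_py_spec : Claim_equal_extract_unit_py := by
  intro amount_str _
  unfold Spec_extract_unit_py extract_unit_py extract_unit_py_alt
  by_cases h : amount_str = ""
  · simp [h]
  · simp only [h, if_false]
    rw [pvOuter_eq_find_flatten, pvFlatten_eq_sorted]
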